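-- pv_equiv track=rewrite | github.com/dev2404/Babber_List | matrix7.py | difference
-- ===== SOURCE A (Python) =====
-- def difference(arr):
--     maxval = 0
--     for a in range(len(arr)-1):
--         for b in range(len(arr)-1):
--             for c in range(a+1, len(arr)):
--                 for d in range(b+1, len(arr)):
--                     if maxval < int(arr[c][d] - arr[a][b]):
--                         maxval = int(arr[c][d] - arr[a][b])
--     return maxval
-- ===== SOURCE B (Python) =====
-- def difference(arr):
--     n = len(arr)
--     if n < 2:
--         return 0
--     # prev[j] = min of arr[a][b] over a <= i-1, b <= j (columns 0..n-2)
--     prev = [arr[0][0]]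
--     for j in range(1, n - 1):
--         prev.append(min(prev[j - 1], arr[0][j]))
--     best = 0
--     for i in range(1, n):
--         row = arr[i]
--         for j in range(1, n):
--             cand = row[j] - prev[j - 1]
--             if cand > best:
--                 best = cand
--         if i < n - 1:
--             cur = [min(prev[0], row[0])]
--             for j in range(1, n - 1):
--                 cur.append(min(cur[j - 1], min(prev[j], row[j])))
--             prev = cur
--     return best
-- ===== Notes on version B (the rewrite author's own statement) =====
-- stated objective: faster
-- what changed: Replaced the quadruple loop over all pairs of cells by a rolling prefix-minimum row (2-D DP): for each cell (i,j) the best subtrahend min over the top-left submatrix is maintained incrementally, one O(n^2) scan instead of O(n^4) pair enumeration.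
import Mathlib
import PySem

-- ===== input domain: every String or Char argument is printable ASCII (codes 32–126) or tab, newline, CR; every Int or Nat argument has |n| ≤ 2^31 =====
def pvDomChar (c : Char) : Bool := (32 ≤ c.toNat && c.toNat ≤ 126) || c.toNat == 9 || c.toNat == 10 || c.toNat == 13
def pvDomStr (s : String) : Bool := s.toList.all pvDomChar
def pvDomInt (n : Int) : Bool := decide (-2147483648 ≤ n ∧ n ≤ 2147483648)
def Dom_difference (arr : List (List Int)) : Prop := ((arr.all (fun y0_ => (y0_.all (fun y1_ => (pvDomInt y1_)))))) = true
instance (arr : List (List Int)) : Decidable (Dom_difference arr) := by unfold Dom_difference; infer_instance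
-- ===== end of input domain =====

-- B replaces A's O(n^4) pair enumeration by a rolling prefix-minimum row (2-D DP), one O(n^2) scan.

-- ===== PORT A =====
-- shared cell access arr[i][j]; out-of-range (excluded by Pre_) defaults to 0
def pvCell (arr : List (List Int)) (i j : Int) : Int :=
  PySem.List.pyGetD (PySem.List.pyGetD arr i []) j 0

def difference (arr : List (List Int)) : Int :=
  let n : Int := arr.length
  (PySem.List.pyRange 0 (n-1) 1).foldl (fun mv a =>
    (PySem.List.pyRange 0 (n-1) 1).foldl (fun mv b =>
      (PySem.List.pyRange (a+1) n 1).foldl (fun mv c =>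
        (PySem.List.pyRange (b+1) n 1).foldl (fun mv d =>
          if mv < pvCell arr c d - pvCell arr a b then pvCell arr c d - pvCell arr a b else mv)
          mv) mv) mv) 0

-- ===== PORT B =====
def difference_alt (arr : List (List Int)) : Int :=
  let n : Int := arr.length
  if n < 2 then 0
  else
    -- prev[j] = min of arr[a][b] over a ≤ current top row, b ≤ j (columns 0..n-2)
    let prev := (PySem.List.pyRange 1 (n-1) 1).foldl
      (fun p j => p ++ [min (PySem.List.pyGetD p (j-1) 0) (pvCell arr 0 j)])
      [pvCell arr 0 0]
    let st := (PySem.List.pyRange 1 n 1).foldl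
      (fun (st : Int × List Int) i =>
        let best := (PySem.List.pyRange 1 n 1).foldl
          (fun best j =>
            let cand := pvCell arr i j - PySem.List.pyGetD st.2 (j-1) 0
            if best < cand then cand else best) st.1
        let prev :=
          if i < n - 1 then
            (PySem.List.pyRange 1 (n-1) 1).foldl
              (fun c j => c ++ [min (PySem.List.pyGetD c (j-1) 0)
                                    (min (PySem.List.pyGetD st.2 j 0) (pvCell arr i j))])
              [min (PySem.List.pyGetD st.2 0 0) (pvCell arr i 0)]
          else st.2
        (best, prev)) (0, prev)
    st.1

-- ===== PRECONDITION & SPEC =====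
-- Pre_: exactly the inputs where Python A returns (no IndexError): with n = len(arr) ≥ 2,
-- row 0 needs ≥ n-1 columns (read only as a minuend's row), every later row needs ≥ n.
def Pre_difference (arr : List (List Int)) : Prop :=
  arr.length ≤ 1 ∨
    (((arr.length : Int) - 1 ≤ ((arr.headD []).length : Int)) ∧
     ∀ row ∈ arr.tail, (arr.length : Int) ≤ (row.length : Int))

instance (arr : List (List Int)) : Decidable (Pre_difference arr) := by
  unfold Pre_difference; infer_instance

def pvWitness_difference : List (List Int) := [[1, 2], [3, 4]]

def Spec_difference (arr : List (List Int)) (out : Int) : Prop := out = difference_alt arr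
instance (arr : List (List Int)) (out : Int) : Decidable (Spec_difference arr out) := by unfold Spec_difference; infer_instance

-- ===== CLAIM (what is proved, stated in full; the proofs are below) =====
def Claim_equal_difference : Prop := ∀ (arr : List (List Int)), Dom_difference arr → Pre_difference arr → Spec_difference arr (difference arr)

-- ===== LEMMAS AND PROOFS =====

-- cell access with Nat indices
def cellN (arr : List (List Int)) (i j : Nat) : Int := (arr.getD i []).getD j 0

-- minimum of arr over the rectangle rows 0..i, cols 0..j
def rectMin (arr : List (List Int)) : Nat → Nat → Int
  | 0, 0 => cellN arr 0 0
  | i+1, 0 => min (rectMin arr i 0) (cellN arr (i+1) 0)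
  | 0, j+1 => min (rectMin arr 0 j) (cellN arr 0 (j+1))
  | i+1, j+1 => min (rectMin arr (i+1) j) (min (rectMin arr i (j+1)) (cellN arr (i+1) (j+1)))

theorem cellN_cast (arr : List (List Int)) (i j : Nat) :
    pvCell arr (i : Int) (j : Int) = cellN arr i j := by
  simp [pvCell, cellN]

theorem rectMin_le (arr : List (List Int)) :
    ∀ i j a b : Nat, a ≤ i → b ≤ j → rectMin arr i j ≤ cellN arr a b := by
  intro i
  induction i with
  | zero =>
    intro j
    induction j with
    | zero =>
      intro a b ha hb
      have ha0 : a = 0 := by omega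
      have hb0 : b = 0 := by omega
      subst ha0; subst hb0
      simp [rectMin]
    | succ j ihj =>
      intro a b ha hb
      have ha0 : a = 0 := by omega
      subst ha0
      simp only [rectMin]
      rcases Nat.lt_or_ge b (j+1) with h | h
      · exact le_trans (min_le_left _ _) (ihj 0 b le_rfl (by omega))
      · have hb' : b = j+1 := by omega
        subst hb'
        exact min_le_right _ _
  | succ i ihi =>
    intro j
    induction j with
    | zero =>
      intro a b ha hb
      have hb0 : b = 0 := by omega
      subst hb0
      simp only [rectMin]
      rcases Nat.lt_or_ge a (i+1) with h | h
      · exact le_trans (min_le_left _ _) (ihi 0 a 0 (by omega) le_rfl)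
      · have ha' : a = i+1 := by omega
        subst ha'
        exact min_le_right _ _
    | succ j ihj =>
      intro a b ha hb
      simp only [rectMin]
      rcases Nat.lt_or_ge b (j+1) with hbj | hbj
      · exact le_trans (min_le_left _ _) (ihj a b ha (by omega))
      · have hb' : b = j+1 := by omega
        subst hb'
        rcases Nat.lt_or_ge a (i+1) with hai | hai
        · exact le_trans (min_le_right _ _)
            (le_trans (min_le_left _ _) (ihi (j+1) a (j+1) (by omega) le_rfl))
        · have ha' : a = i+1 := by omega
          subst ha'
          exact le_trans (min_le_right _ _) (min_le_right _ _)

theorem rectMin_attained (arr : List (List Int)) :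
    ∀ i j : Nat, ∃ a b : Nat, a ≤ i ∧ b ≤ j ∧ rectMin arr i j = cellN arr a b := by
  intro i
  induction i with
  | zero =>
    intro j
    induction j with
    | zero => exact ⟨0, 0, le_rfl, le_rfl, by simp [rectMin]⟩
    | succ j ihj =>
      simp only [rectMin]
      rcases min_choice (rectMin arr 0 j) (cellN arr 0 (j+1)) with h | h
      · obtain ⟨a, b, ha, hb, he⟩ := ihj
        exact ⟨a, b, ha, by omega, by rw [h, he]⟩
      · exact ⟨0, j+1, le_rfl, le_rfl, h⟩
  | succ i ihi =>
    intro j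
    induction j with
    | zero =>
      simp only [rectMin]
      rcases min_choice (rectMin arr i 0) (cellN arr (i+1) 0) with h | h
      · obtain ⟨a, b, ha, hb, he⟩ := ihi 0
        exact ⟨a, b, by omega, hb, by rw [h, he]⟩
      · exact ⟨i+1, 0, le_rfl, le_rfl, h⟩
    | succ j ihj =>
      simp only [rectMin]
      rcases min_choice (rectMin arr (i+1) j) (min (rectMin arr i (j+1)) (cellN arr (i+1) (j+1))) with h | h
      · obtain ⟨a, b, ha, hb, he⟩ := ihj
        exact ⟨a, b, ha, by omega, by rw [h, he]⟩
      · rcases min_choice (rectMin arr i (j+1)) (cellN arr (i+1) (j+1)) with h2 | h2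
        · obtain ⟨a, b, ha, hb, he⟩ := ihi (j+1)
          exact ⟨a, b, by omega, hb, by rw [h, h2, he]⟩
        · exact ⟨i+1, j+1, le_rfl, le_rfl, by rw [h, h2]⟩

-- generic fold-max helpers
theorem foldl_max_le {L : List Int} {init M : Int} (h0 : init ≤ M) (h : ∀ x ∈ L, x ≤ M) :
    L.foldl max init ≤ M := by
  induction L generalizing init with
  | nil => exact h0
  | cons x t ih =>
      exact ih (max_le h0 (h x (by simp))) (fun y hy => h y (by simp [hy]))

theorem foldl_max_eq_of_dominates (L1 L2 : List Int)
    (h1 : ∀ x ∈ L1, ∃ y ∈ L2, x ≤ y) (h2 : ∀ y ∈ L2, ∃ x ∈ L1, y ≤ x) :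
    L1.foldl max 0 = L2.foldl max 0 := by
  have up : ∀ (L L' : List Int), (∀ x ∈ L, ∃ y ∈ L', x ≤ y) → L.foldl max 0 ≤ L'.foldl max 0 := by
    intro L L' h
    refine foldl_max_le ((PySem.List.le_foldl_max L' 0).1) ?_
    intro x hx
    obtain ⟨y, hy, hxy⟩ := h x hx
    exact le_trans hxy ((PySem.List.le_foldl_max L' 0).2 y hy)
  exact le_antisymm (up L1 L2 h1) (up L2 L1 h2)

theorem foldl_max_flat {α : Type} (L : List α) (g : α → List Int) (init : Int) :
    L.foldl (fun acc x => (g x).foldl max acc) init = (L.flatMap g).foldl max init := by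
  induction L generalizing init with
  | nil => rfl
  | cons x t ih => simp [List.flatMap_cons, List.foldl_append, ih]

theorem if_lt_eq_max (mv v : Int) : (if mv < v then v else mv) = max mv v := by
  split <;> omega

-- A's candidate list
def QA (arr : List (List Int)) : List Int :=
  let n : Int := arr.length
  (PySem.List.pyRange 0 (n-1) 1).flatMap (fun a =>
    (PySem.List.pyRange 0 (n-1) 1).flatMap (fun b =>
      (PySem.List.pyRange (a+1) n 1).flatMap (fun c =>
        (PySem.List.pyRange (b+1) n 1).map (fun d => pvCell arr c d - pvCell arr a b))))

theorem foldl_ifmax {α : Type} (L : List α) (f : α → Int) (init : Int) :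
    L.foldl (fun mv x => if mv < f x then f x else mv) init = (L.map f).foldl max init := by
  induction L generalizing init with
  | nil => rfl
  | cons x t ih =>
      rw [List.foldl_cons, List.map_cons, List.foldl_cons, if_lt_eq_max, ih]

theorem A_eq (arr : List (List Int)) : difference arr = (QA arr).foldl max 0 := by
  unfold difference QA
  simp only [foldl_ifmax, foldl_max_flat]

-- B's candidate list (Nat-indexed)
def PB (arr : List (List Int)) (m : Nat) : List Int :=
  (List.range m).flatMap (fun i =>
    (List.range (arr.length - 1)).map (fun j => cellN arr (i+1) (j+1) - rectMin arr i j))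

-- running prefix minimum of F over 0..k
def pmin (F : Int → Int) : Nat → Int
  | 0 => F 0
  | j+1 => min (pmin F j) (F (j+1))

theorem build_fold (F : Int → Int) (m : Nat) :
    (PySem.List.pyRange 1 (1+(m:Int)) 1).foldl
      (fun p j => p ++ [min (PySem.List.pyGetD p (j-1) 0) (F j)]) [F 0]
    = (List.range (1+m)).map (pmin F) := by
  induction m with
  | zero =>
      simp [pmin]
  | succ m ih =>
      rw [show (1:Int) + ((m+1:Nat):Int) = (1+(m:Int)) + 1 by push_cast; ring,
          PySem.List.pyRange_one_succ_right (by omega), List.foldl_append, ih]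
      simp only [List.foldl_cons, List.foldl_nil]
      rw [show (1:Nat) + (m+1) = (1+m)+1 from rfl, List.range_succ, List.map_append]
      congr 1
      rw [show (1:Int)+(m:Int)-1 = ((m:Nat):Int) by omega]
      rw [show (1:Int)+(m:Int) = ((m+1:Nat):Int) by omega]
      simp only [List.map_singleton]
      congr 1
      rw [PySem.List.pyGetD_natCast, PySem.List.getD_map_range (pmin F) (1+m) m 0 (by omega)]
      show min (pmin F m) (F ((m+1:Nat):Int)) = pmin F (1+m)
      simp only [pmin, show (1:Nat)+m = m+1 from by omega]
      norm_cast

theorem pmin_row0 (arr : List (List Int)) : ∀ k : Nat,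
    pmin (fun j => pvCell arr 0 j) k = rectMin arr 0 k := by
  intro k
  induction k with
  | zero =>
      simp only [pmin, rectMin]
      simpa using cellN_cast arr 0 0
  | succ k ih =>
      simp only [pmin, rectMin, ih]
      congr 1
      simpa using cellN_cast arr 0 (k+1)

theorem pmin_step (arr : List (List Int)) (m : Nat) (hm : 0 < arr.length - 1) :
    ∀ k : Nat, k < arr.length - 1 →
    pmin (fun j => min (PySem.List.pyGetD ((List.range (arr.length-1)).map (rectMin arr m)) j 0)
                       (pvCell arr (1+(m:Int)) j)) k
    = rectMin arr (m+1) k := by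
  intro k
  induction k with
  | zero =>
      intro _
      simp only [pmin]
      rw [PySem.List.pyGetD_zero,
          show ((List.range (arr.length-1)).map (rectMin arr m)).getD 0 0
             = rectMin arr m 0 from
            PySem.List.getD_map_range (rectMin arr m) (arr.length-1) 0 0 hm]
      simp only [rectMin]
      congr 1
      have := cellN_cast arr (m+1) 0
      push_cast at this ⊢
      rw [← this]
      ring_nf
  | succ k ih =>
      intro hk
      simp only [pmin]
      rw [ih (by omega), show ((k:Int)+1) = ((k+1:Nat):Int) by push_cast; ring,
          PySem.List.pyGetD_natCast,
          PySem.List.getD_map_range (rectMin arr m) (arr.length-1) (k+1) 0 hk]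
      simp only [rectMin]
      congr 2
      have := cellN_cast arr (m+1) (k+1)
      push_cast at this ⊢
      rw [← this]
      ring_nf

theorem outer_inv (arr : List (List Int)) (h2 : 2 ≤ arr.length) :
    ∀ m : Nat, m ≤ arr.length - 1 →
    (PySem.List.pyRange 1 (1+(m:Int)) 1).foldl
      (fun (st : Int × List Int) i =>
        let best := (PySem.List.pyRange 1 ((arr.length:Int)) 1).foldl
          (fun best j =>
            let cand := pvCell arr i j - PySem.List.pyGetD st.2 (j-1) 0
            if best < cand then cand else best) st.1
        let prev :=
          if i < ((arr.length:Int)) - 1 then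
            (PySem.List.pyRange 1 (((arr.length:Int))-1) 1).foldl
              (fun c j => c ++ [min (PySem.List.pyGetD c (j-1) 0)
                                    (min (PySem.List.pyGetD st.2 j 0) (pvCell arr i j))])
              [min (PySem.List.pyGetD st.2 0 0) (pvCell arr i 0)]
          else st.2
        (best, prev))
      (0, (List.range (arr.length-1)).map (rectMin arr 0))
    = ((PB arr m).foldl max 0,
       (List.range (arr.length-1)).map (rectMin arr (min m (arr.length-2)))) := by
  intro m
  induction m with
  | zero =>
      intro _
      simp [PB]
  | succ m ih =>
      intro hm1
      rw [show (1:Int) + ((m+1:Nat):Int) = (1+(m:Int)) + 1 by push_cast; ring,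
          PySem.List.pyRange_one_succ_right (by omega), List.foldl_append, ih (by omega)]
      simp only [List.foldl_cons, List.foldl_nil]
      rw [show min m (arr.length-2) = m from by omega, Prod.mk.injEq]
      constructor
      · -- best component
        rw [foldl_ifmax]
        have hrow : (PySem.List.pyRange 1 ((arr.length:Int)) 1).map
            (fun j => pvCell arr (1+(m:Int)) j -
              PySem.List.pyGetD ((List.range (arr.length-1)).map (rectMin arr m)) (j-1) 0)
            = (List.range (arr.length-1)).map
                (fun j => cellN arr (m+1) (j+1) - rectMin arr m j) := by
          rw [PySem.List.pyRange_one, show ((arr.length:Int) - 1).toNat = arr.length - 1 from by omega,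
              List.map_map]
          refine List.map_congr_left ?_
          intro k hk
          simp only [List.mem_range] at hk
          show pvCell arr (1+(m:Int)) (1+(k:Int)) -
              PySem.List.pyGetD ((List.range (arr.length-1)).map (rectMin arr m)) ((1:Int)+(k:Int)-1) 0
            = cellN arr (m+1) (k+1) - rectMin arr m k
          rw [show (1:Int)+(k:Int)-1 = ((k:Nat):Int) by omega,
              PySem.List.pyGetD_natCast,
              PySem.List.getD_map_range (rectMin arr m) (arr.length-1) k 0 hk]
          congr 1
          have := cellN_cast arr (m+1) (k+1)
          push_cast at this ⊢
          rw [← this]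
          ring_nf
        rw [hrow, show PB arr (m+1) = PB arr m ++ (List.range (arr.length-1)).map
              (fun j => cellN arr (m+1) (j+1) - rectMin arr m j) from by
            simp [PB, List.range_succ],
          List.foldl_append]
      · -- prev component
        by_cases hc : m + 1 < arr.length - 1
        · rw [if_pos (by omega : (1:Int)+(m:Int) < (arr.length:Int) - 1)]
          have hb := build_fold
            (fun j => min (PySem.List.pyGetD ((List.range (arr.length-1)).map (rectMin arr m)) j 0)
                          (pvCell arr (1+(m:Int)) j)) (arr.length-2)
          beta_reduce at hb
          rw [show ((arr.length:Int)) - 1 = 1 + ((arr.length-2 : Nat):Int) from by omega, hb,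
              show 1+(arr.length-2) = arr.length-1 from by omega,
              show min (m+1) (arr.length-2) = m+1 from by omega]
          refine List.map_congr_left ?_
          intro k hk
          simp only [List.mem_range] at hk
          exact pmin_step arr m (by omega) k hk
        · rw [if_neg (by omega : ¬ ((1:Int)+(m:Int) < (arr.length:Int) - 1)),
              show min (m+1) (arr.length-2) = m from by omega]

theorem B_eq (arr : List (List Int)) (h2 : 2 ≤ arr.length) :
    difference_alt arr = (PB arr (arr.length - 1)).foldl max 0 := by
  simp only [difference_alt]
  rw [if_neg (by omega : ¬ ((arr.length:Int) < 2))]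
  have hprev0 : (PySem.List.pyRange 1 ((arr.length:Int)-1) 1).foldl
      (fun p j => p ++ [min (PySem.List.pyGetD p (j-1) 0) (pvCell arr 0 j)]) [pvCell arr 0 0]
      = (List.range (arr.length-1)).map (rectMin arr 0) := by
    have hb := build_fold (fun j => pvCell arr 0 j) (arr.length-2)
    beta_reduce at hb
    rw [show ((arr.length:Int)) - 1 = 1 + ((arr.length-2 : Nat):Int) from by omega, hb,
        show 1+(arr.length-2) = arr.length-1 from by omega]
    exact List.map_congr_left (fun k _ => pmin_row0 arr k)
  rw [hprev0]
  have HO := outer_inv arr h2 (arr.length-1) le_rfl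
  rw [show (1:Int) + ((arr.length-1 : Nat):Int) = (arr.length:Int) from by omega] at HO
  rw [HO]

theorem mem_PB (arr : List (List Int)) (m : Nat) (x : Int) :
    x ∈ PB arr m ↔ ∃ i < m, ∃ j < arr.length - 1,
      x = cellN arr (i+1) (j+1) - rectMin arr i j := by
  simp only [PB, List.mem_flatMap, List.mem_map, List.mem_range]
  constructor
  · rintro ⟨i, hi, ⟨j, hj, rfl⟩⟩
    exact ⟨i, hi, j, hj, rfl⟩
  · rintro ⟨i, hi, j, hj, rfl⟩
    exact ⟨i, hi, j, hj, rfl⟩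

theorem mem_QA (arr : List (List Int)) (x : Int) :
    x ∈ QA arr ↔ ∃ a b c d : Int,
      (0 ≤ a ∧ a < (arr.length:Int) - 1) ∧ (0 ≤ b ∧ b < (arr.length:Int) - 1) ∧
      (a + 1 ≤ c ∧ c < (arr.length:Int)) ∧ (b + 1 ≤ d ∧ d < (arr.length:Int)) ∧
      x = pvCell arr c d - pvCell arr a b := by
  simp only [QA, List.mem_flatMap, List.mem_map, PySem.List.mem_pyRange_one]
  constructor
  · rintro ⟨a, ⟨ha0, ha1⟩, b, ⟨hb0, hb1⟩, c, ⟨hc0, hc1⟩, d, ⟨hd0, hd1⟩, rfl⟩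
    exact ⟨a, b, c, d, ⟨ha0, ha1⟩, ⟨hb0, hb1⟩, ⟨hc0, hc1⟩, ⟨hd0, hd1⟩, rfl⟩
  · rintro ⟨a, b, c, d, ⟨ha0, ha1⟩, ⟨hb0, hb1⟩, ⟨hc0, hc1⟩, ⟨hd0, hd1⟩, rfl⟩
    exact ⟨a, ⟨ha0, ha1⟩, b, ⟨hb0, hb1⟩, c, ⟨hc0, hc1⟩, d, ⟨hd0, hd1⟩, rfl⟩

theorem pvCell_toNat (arr : List (List Int)) (i j : Int) (hi : 0 ≤ i) (hj : 0 ≤ j) :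
    pvCell arr i j = cellN arr i.toNat j.toNat := by
  lift i to Nat using hi
  lift j to Nat using hj
  simpa using cellN_cast arr i j

theorem main_eq (arr : List (List Int)) : difference arr = difference_alt arr := by
  by_cases h2 : 2 ≤ arr.length
  · rw [A_eq, B_eq arr h2]
    apply foldl_max_eq_of_dominates
    · -- every A candidate is dominated by a B candidate
      intro x hx
      obtain ⟨a, b, c, d, ⟨ha0, ha1⟩, ⟨hb0, hb1⟩, ⟨hc0, hc1⟩, ⟨hd0, hd1⟩, rfl⟩ := (mem_QA arr x).1 hx
      refine ⟨cellN arr ((c.toNat-1)+1) ((d.toNat-1)+1) - rectMin arr (c.toNat-1) (d.toNat-1), ?_, ?_⟩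
      · exact (mem_PB arr _ _).2 ⟨c.toNat-1, by omega, d.toNat-1, by omega, rfl⟩
      · have hcd : pvCell arr c d = cellN arr ((c.toNat-1)+1) ((d.toNat-1)+1) := by
          rw [pvCell_toNat arr c d (by omega) (by omega)]
          congr 1 <;> omega
        rw [hcd]
        have hab : pvCell arr a b = cellN arr a.toNat b.toNat :=
          pvCell_toNat arr a b ha0 hb0
        rw [hab]
        have := rectMin_le arr (c.toNat-1) (d.toNat-1) a.toNat b.toNat (by omega) (by omega)
        omega
    · -- every B candidate is attained by an A candidate
      intro y hy
      obtain ⟨i, hi, j, hj, rfl⟩ := (mem_PB arr _ y).1 hy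
      obtain ⟨a, b, ha, hb, he⟩ := rectMin_attained arr i j
      refine ⟨cellN arr (i+1) (j+1) - rectMin arr i j, ?_, le_rfl⟩
      refine (mem_QA arr _).2 ⟨(a:Int), (b:Int), ((i+1:Nat):Int), ((j+1:Nat):Int),
        ⟨by omega, by omega⟩, ⟨by omega, by omega⟩, ⟨by omega, by omega⟩, ⟨by omega, by omega⟩, ?_⟩
      rw [cellN_cast, he]
      congr 1
      rw [cellN_cast]
  · -- fewer than two rows: both sides are 0
    have hA : difference arr = 0 := by
      simp only [difference]
      rw [PySem.List.pyRange_one_eq_nil (by omega : (arr.length:Int) - 1 ≤ 0)]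
      rfl
    have hB : difference_alt arr = 0 := by
      simp only [difference_alt]
      rw [if_pos (by omega : (arr.length:Int) < 2)]
    rw [hA, hB]

-- ===== VERDICT (by name: the statement is the Claim_ definition above) =====
theorem difference_spec : Claim_equal_difference := by
  intro arr _ _
  exact main_eq arr
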